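-- pv_equiv track=rewrite | github.com/brenanstewart/FIN5350HWK | Nugget.py | possiblenuggets
-- ===== SOURCE A (Python) =====
-- package = (6, 9, 20)
--
-- def possiblenuggets(number):
--     obtainable = None
--     for i in range(15):
--         for j in range(15):
--             for k in range(15):
--                 check = package[0] * i + package[1] * j + package[2] * k
--                 if check == number:
--                     obtainable = check
--     if obtainable:
--         return True
--     else:
--         return False
-- ===== SOURCE B (Python) =====
-- # Table-first re-implementation: build the reachable set once, answer by membership.
-- _REACHABLE = {6 * i + 9 * j + 20 * k
--               for i in range(15) for j in range(15) for k in range(15)}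
--
-- def possiblenuggets(number):
--     return number in _REACHABLE
-- ===== Notes on version B (the rewrite author's own statement) =====
-- stated objective: simpler
-- what changed: B precomputes the set of all reachable nugget totals once and answers each query with a single membership test, replacing A's triple nested loop with an inline equality scan and a truthiness check on the last matching value.
-- intended difference: For number == 0, which is reachable by buying zero of each package, A returns False only because the stored value is falsy in Python, while B returns True; True is the intended answer since zero nuggets are trivially obtainable. — e.g. on possiblenuggets(0): A returns false, B returns true
import Mathlib
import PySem

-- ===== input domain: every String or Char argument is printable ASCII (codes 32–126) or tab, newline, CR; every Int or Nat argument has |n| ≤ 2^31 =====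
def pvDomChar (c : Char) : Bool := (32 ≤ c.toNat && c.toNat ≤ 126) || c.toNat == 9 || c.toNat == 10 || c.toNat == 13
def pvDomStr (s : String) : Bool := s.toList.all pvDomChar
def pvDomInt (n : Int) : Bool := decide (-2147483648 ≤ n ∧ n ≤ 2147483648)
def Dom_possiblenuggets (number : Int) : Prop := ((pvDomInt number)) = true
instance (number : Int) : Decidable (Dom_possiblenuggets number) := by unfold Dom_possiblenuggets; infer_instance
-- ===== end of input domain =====

-- B replaces A's triple equality-scan loop by a precomputed reachable-value table plus one
-- membership test; on number = 0 (only) B returns the intended True where A's truthiness check yields False.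

-- ===== PORT A =====
def possiblenuggets (number : Int) : Bool :=
  let package : Int × Int × Int := (6, 9, 20)
  let obtainable : Option Int :=
    (PySem.List.pyRange 0 15 1).foldl (fun acc i =>
      (PySem.List.pyRange 0 15 1).foldl (fun acc j =>
        (PySem.List.pyRange 0 15 1).foldl (fun acc k =>
          let check := package.1 * i + package.2.1 * j + package.2.2 * k
          if check == number then some check else acc) acc) acc) none
  match obtainable with          -- `if obtainable:` — truthiness: Some 0 is falsy
  | some v => decide (v ≠ 0)
  | none => false

-- ===== PORT B =====
def nuggetTable : PySem.Set Int :=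
  PySem.Set.ofList ((PySem.List.pyRange 0 15 1).flatMap (fun i =>
    (PySem.List.pyRange 0 15 1).flatMap (fun j =>
      (PySem.List.pyRange 0 15 1).map (fun k => 6 * i + 9 * j + 20 * k))))

def possiblenuggets_alt (number : Int) : Bool :=
  decide (number ∈ nuggetTable)

-- ===== PRECONDITION & SPEC =====
-- For number == 0 (reachable as 6*0+9*0+20*0) A returns False only because the stored 0 is
-- falsy in Python, while B returns True, the intended answer (0 nuggets are trivially obtainable).
def D_possiblenuggets (number : Int) : Prop := number = 0
instance (number : Int) : Decidable (D_possiblenuggets number) := by unfold D_possiblenuggets; infer_instance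
def Spec_possiblenuggets (number : Int) (out : Bool) : Prop := ¬ D_possiblenuggets number → out = possiblenuggets_alt number
instance (number : Int) (out : Bool) : Decidable (Spec_possiblenuggets number out) := by unfold Spec_possiblenuggets; infer_instance
def pvDiffWitness_possiblenuggets : Int := 0
def pvDiffWitnessOut_possiblenuggets : Bool × Bool := (false, true)

-- ===== CLAIM (what is proved, stated in full; the proofs are below) =====
def Claim_unchanged_possiblenuggets : Prop := ∀ (number : Int), Dom_possiblenuggets number → Spec_possiblenuggets number (possiblenuggets number)
def Claim_changed_possiblenuggets : Prop := Dom_possiblenuggets (pvDiffWitness_possiblenuggets) ∧ D_possiblenuggets (pvDiffWitness_possiblenuggets) ∧ possiblenuggets (pvDiffWitness_possiblenuggets) = pvDiffWitnessOut_possiblenuggets.1 ∧ possiblenuggets_alt (pvDiffWitness_possiblenuggets) = pvDiffWitnessOut_possiblenuggets.2 ∧ pvDiffWitnessOut_possiblenuggets.1 ≠ pvDiffWitnessOut_possiblenuggets.2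
def Claim_exact_possiblenuggets : Prop := ∀ (number : Int), Dom_possiblenuggets number → D_possiblenuggets number → possiblenuggets number ≠ possiblenuggets_alt number

-- ===== LEMMAS AND PROOFS =====

/-- Outer loops that overwrite the accumulator with `some n` when an inner hit exists. -/
lemma foldl_hit (n : Int) (l : List Int) (P : Int → Prop) [DecidablePred P] (init : Option Int) :
    l.foldl (fun acc x => if P x then some n else acc) init
      = if ∃ x ∈ l, P x then some n else init := by
  induction l generalizing init with
  | nil => simp
  | cons x l ih =>
    simp only [List.foldl_cons, ih, List.exists_mem_cons_iff]
    by_cases h : P x <;> simp [h]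

lemma possiblenuggets_char (n : Int) :
    possiblenuggets n
      = if (∃ i ∈ PySem.List.pyRange 0 15 1, ∃ j ∈ PySem.List.pyRange 0 15 1,
            ∃ k ∈ PySem.List.pyRange 0 15 1, 6 * i + 9 * j + 20 * k = n)
        then decide (n ≠ 0) else false := by
  unfold possiblenuggets
  have hinner : ∀ (i j : Int) (acc : Option Int),
      (PySem.List.pyRange 0 15 1).foldl
        (fun acc k => if 6 * i + 9 * j + 20 * k == n then some (6 * i + 9 * j + 20 * k) else acc) acc
        = if (∃ k ∈ PySem.List.pyRange 0 15 1, 6 * i + 9 * j + 20 * k = n) then some n else acc := by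
    intro i j acc
    rw [show (fun (acc : Option Int) (k : Int) =>
          if 6 * i + 9 * j + 20 * k == n then some (6 * i + 9 * j + 20 * k) else acc)
        = fun acc k => if 6 * i + 9 * j + 20 * k = n then some n else acc from by
          funext acc k
          by_cases h : 6 * i + 9 * j + 20 * k = n <;> simp [h]]
    exact foldl_hit n _ (fun k => 6 * i + 9 * j + 20 * k = n) acc
  simp only [hinner]
  rw [show (fun (acc : Option Int) (i : Int) =>
        (PySem.List.pyRange 0 15 1).foldl (fun acc j =>
          if (∃ k ∈ PySem.List.pyRange 0 15 1, 6 * i + 9 * j + 20 * k = n) then some n else acc) acc)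
      = fun acc i => if (∃ j ∈ PySem.List.pyRange 0 15 1, ∃ k ∈ PySem.List.pyRange 0 15 1,
          6 * i + 9 * j + 20 * k = n) then some n else acc from by
        funext acc i
        exact foldl_hit n _ (fun j => ∃ k ∈ PySem.List.pyRange 0 15 1, 6 * i + 9 * j + 20 * k = n) acc]
  rw [foldl_hit n _ (fun i => ∃ j ∈ PySem.List.pyRange 0 15 1, ∃ k ∈ PySem.List.pyRange 0 15 1,
        6 * i + 9 * j + 20 * k = n) none]
  split_ifs <;> rfl

lemma possiblenuggets_alt_char (n : Int) :
    possiblenuggets_alt n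
      = decide (∃ i ∈ PySem.List.pyRange 0 15 1, ∃ j ∈ PySem.List.pyRange 0 15 1,
          ∃ k ∈ PySem.List.pyRange 0 15 1, 6 * i + 9 * j + 20 * k = n) := by
  unfold possiblenuggets_alt nuggetTable
  rw [decide_eq_decide, PySem.Set.mem_ofList]
  simp [List.mem_flatMap, List.mem_map, eq_comm]

-- ===== VERDICT (by name: the statement is the Claim_ definition above) =====
theorem possiblenuggets_spec : Claim_unchanged_possiblenuggets := by
  intro n _ hnd
  have hn : n ≠ 0 := hnd
  rw [possiblenuggets_char, possiblenuggets_alt_char]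
  by_cases h : (∃ i ∈ PySem.List.pyRange 0 15 1, ∃ j ∈ PySem.List.pyRange 0 15 1,
      ∃ k ∈ PySem.List.pyRange 0 15 1, 6 * i + 9 * j + 20 * k = n) <;> simp [hn]

theorem possiblenuggets_changed : Claim_changed_possiblenuggets := by
  unfold Claim_changed_possiblenuggets
  refine ⟨by decide, rfl, ?_, ?_, by decide⟩
  · show possiblenuggets 0 = false
    rw [possiblenuggets_char]; split_ifs <;> simp
  · show possiblenuggets_alt 0 = true
    rw [possiblenuggets_alt_char]
    simp only [decide_eq_true_eq]
    exact ⟨0, by simp [PySem.List.mem_pyRange_one], 0, by simp [PySem.List.mem_pyRange_one],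
           0, by simp [PySem.List.mem_pyRange_one], by ring⟩

theorem possiblenuggets_tight : Claim_exact_possiblenuggets := by
  intro n _ hd
  subst hd
  have h := possiblenuggets_changed
  unfold Claim_changed_possiblenuggets at h
  simp only [pvDiffWitness_possiblenuggets, pvDiffWitnessOut_possiblenuggets] at h
  rw [h.2.2.1, h.2.2.2.1]
  decide
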